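-- pv_equiv track=rewrite | github.com/yamnikov-oleg/notedown | markdown.py | render_line
-- ===== SOURCE A (Python) =====
-- def render_line(line, disallow_tags=None):
--     SPANS = {
--         "***": ("<strong><em>", "</em></strong>"),
--         "___": ("<strong><em>", "</em></strong>"),
--         "**": ("<strong>", "</strong>"),
--         "__": ("<strong>", "</strong>"),
--         "*": ("<em>", "</em>"),
--         "_": ("<em>", "</em>"),
--     }
--
--     if disallow_tags is None:
--         disallow_tags = []
--
--     found_spans = []
--     for span, (left_tag, _) in SPANS.items():
--         if left_tag in disallow_tags:
--             continue
--
--         ind = line.find(span)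
--         if ind < 0:
--             continue
--
--         found_spans.append((span, ind))
--
--     found_spans = sorted(found_spans, key=lambda span_ind: (span_ind[1], -len(span_ind[0])))
--
--     for span, ind in found_spans:
--         pair_ind = line.find(span, ind+len(span))
--         if pair_ind < 0:
--             # No pair for this span :(
--             continue
--
--         before_spans = line[:ind]
--         between_spans = line[ind+len(span):pair_ind]
--         after_spans = line[pair_ind+len(span):]
--
--         if between_spans == "":
--             # Empty spans are nonsense, should count
--             continue
--
--         left_tag, right_tag = SPANS[span]
--         disallow_tags += [ left_tag ]
--         line = before_spans + \
--                left_tag + render_line(between_spans, disallow_tags) + right_tag + \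
--                render_line(after_spans, disallow_tags)
--         return line
--
--     return line
-- ===== SOURCE B (Python) =====
-- # Same rendering as A, but the tail recursion on `after_spans` is unrolled into a
-- # while-loop with a `result` accumulator, and the span search is factored out.
-- _SPANS = {
--     "***": ("<strong><em>", "</em></strong>"),
--     "___": ("<strong><em>", "</em></strong>"),
--     "**": ("<strong>", "</strong>"),
--     "__": ("<strong>", "</strong>"),
--     "*": ("<em>", "</em>"),
--     "_": ("<em>", "</em>"),
-- }
--
--
-- def _find_span(line, disallow_tags):
--     """First usable span of `line`: earliest occurrence, longest marker first."""
--     candidates = [(span, line.find(span))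
--                   for span, (left_tag, _) in _SPANS.items()
--                   if left_tag not in disallow_tags and line.find(span) >= 0]
--     for span, ind in sorted(candidates, key=lambda si: (si[1], -len(si[0]))):
--         pair_ind = line.find(span, ind + len(span))
--         if pair_ind < 0:
--             continue
--         if line[ind + len(span):pair_ind] == "":
--             continue
--         return span, ind, pair_ind
--     return None
--
--
-- def render_line(line, disallow_tags=None):
--     if disallow_tags is None:
--         disallow_tags = []
--     result = []
--     while True:
--         found = _find_span(line, disallow_tags)
--         if found is None:
--             result.append(line)
--             return "".join(result)
--         span, ind, pair_ind = found
--         left_tag, right_tag = _SPANS[span]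
--         disallow_tags.append(left_tag)
--         between = line[ind + len(span):pair_ind]
--         result.append(line[:ind] + left_tag
--                       + render_line(between, disallow_tags) + right_tag)
--         line = line[pair_ind + len(span):]
-- ===== Notes on version B (the rewrite author's own statement) =====
-- stated objective: alternative
-- what changed: A's tail recursion on after_spans is unrolled into a while-loop with a result accumulator (the between-span call stays recursive), and the candidate search is factored into a _find_span helper built with a comprehension instead of a loop of appends.
import Mathlib
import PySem

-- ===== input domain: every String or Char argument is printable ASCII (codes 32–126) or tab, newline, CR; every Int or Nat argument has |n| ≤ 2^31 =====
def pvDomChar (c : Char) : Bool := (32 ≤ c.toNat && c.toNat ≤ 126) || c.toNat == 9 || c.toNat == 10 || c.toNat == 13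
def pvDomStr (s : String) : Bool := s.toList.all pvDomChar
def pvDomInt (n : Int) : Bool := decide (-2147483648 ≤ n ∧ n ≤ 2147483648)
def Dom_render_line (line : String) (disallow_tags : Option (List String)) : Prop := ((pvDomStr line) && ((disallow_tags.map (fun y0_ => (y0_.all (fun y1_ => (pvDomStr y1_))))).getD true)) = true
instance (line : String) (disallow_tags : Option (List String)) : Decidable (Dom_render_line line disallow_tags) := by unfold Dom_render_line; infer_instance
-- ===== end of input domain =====

-- B unrolls A's tail recursion on `after_spans` into an accumulator loop and factors the
-- span search into a helper; same return value. Side effect note: Python A mutates the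
-- caller's `disallow_tags` list in place (`+= [left_tag]`); Python B performs the same
-- in-place mutation (`.append`), and the ports thread that list state explicitly. The
-- equivalence proved here is about the return value; fuel `len(line)+1` bounds the
-- recursion depth (each recursive call is on a strictly shorter string) and the
-- equivalence is proved for every fuel, so it does not depend on that bound.

-- the SPANS literal, shared by both Pythons: (marker, left_tag, right_tag) in dict order
def spansTable : List (List Char × String × String) :=
  [(['*','*','*'], "<strong><em>", "</em></strong>"),
   (['_','_','_'], "<strong><em>", "</em></strong>"),
   (['*','*'], "<strong>", "</strong>"),
   (['_','_'], "<strong>", "</strong>"),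
   (['*'], "<em>", "</em>"),
   (['_'], "<em>", "</em>")]

-- ===== PORT A =====
-- A's first loop (collect found_spans) followed by the sorted(...) call
def candsA (line : List Char) (d : List String) : List (List Char × String × String × Int) :=
  PySem.List.sorted2
    (spansTable.foldl (fun acc s =>
      if s.2.1 ∈ d then acc
      else
        let ind := PySem.Chars.find line s.1
        if ind < 0 then acc else acc ++ [(s.1, s.2.1, s.2.2, ind)]) [])
    (fun c => c.2.2.2) (fun c => -((c.1.length : Int)))

-- A's second for-loop: the recursive calls are abstracted as `r` (= renderA on smaller fuel)
def scanA (r : List Char → List String → (List Char × List String)) (line : List Char)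
    (d : List String) : List (List Char × String × String × Int) → (List Char × List String)
  | [] => (line, d)
  | c :: rest =>
    let pair := PySem.Chars.findFrom line c.1 (c.2.2.2 + (c.1.length : Int))
    if pair < 0 then scanA r line d rest
    else
      let between := PySem.List.slice line (some (c.2.2.2 + (c.1.length : Int))) (some pair)
      if between = [] then scanA r line d rest
      else
        let d1 := d ++ [c.2.1]
        let p := r between d1
        let q := r (PySem.List.slice line (some (pair + (c.1.length : Int)))) p.2
        (PySem.List.slice line none (some c.2.2.2) ++ c.2.1.toList ++ p.1
           ++ c.2.2.1.toList ++ q.1, q.2)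

def renderA : Nat → List Char → List String → (List Char × List String)
  | 0, line, d => (line, d)                     -- fuel exhausted (never reached, see header)
  | f + 1, line, d => scanA (fun l dd => renderA f l dd) line d (candsA line d)

def render_line (line : String) (disallow_tags : Option (List String)) : String :=
  String.ofList (renderA (line.toList.length + 1) line.toList (disallow_tags.getD [])).1

-- ===== PORT B =====
-- B's candidate comprehension + sorted(...)
def candsB (line : List Char) (d : List String) : List (List Char × String × String × Int) :=
  PySem.List.sorted2
    (spansTable.filterMap (fun s =>
      if s.2.1 ∈ d then none
      else
        let ind := PySem.Chars.find line s.1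
        if ind < 0 then none else some (s.1, s.2.1, s.2.2, ind)))
    (fun c => c.2.2.2) (fun c => -((c.1.length : Int)))

-- B's _find_span: scan the sorted candidates for the first one with a non-empty pair
def scanFindB (line : List Char) :
    List (List Char × String × String × Int) → Option (List Char × String × String × Int × Int)
  | [] => none
  | c :: rest =>
    let pair := PySem.Chars.findFrom line c.1 (c.2.2.2 + (c.1.length : Int))
    if pair < 0 then scanFindB line rest
    else if PySem.List.slice line (some (c.2.2.2 + (c.1.length : Int))) (some pair) = [] then
      scanFindB line rest
    else some (c.1, c.2.1, c.2.2.1, c.2.2.2, pair)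

def findSpanB (line : List Char) (d : List String) :
    Option (List Char × String × String × Int × Int) :=
  scanFindB line (candsB line d)

-- B's `while True` loop with the `result` accumulator; the render_line(between, …)
-- recursive call is the `loopB f … []` on fresh accumulator
def loopB : Nat → List Char → List String → List Char → (List Char × List String)
  | 0, line, d, acc => (acc ++ line, d)         -- fuel exhausted (never reached, see header)
  | f + 1, line, d, acc =>
    match findSpanB line d with
    | none => (acc ++ line, d)
    | some (span, lt, rt, ind, pair) =>
      let d1 := d ++ [lt]
      let p := loopB f (PySem.List.slice line (some (ind + (span.length : Int))) (some pair)) d1 []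
      loopB f (PySem.List.slice line (some (pair + (span.length : Int)))) p.2
        (acc ++ PySem.List.slice line none (some ind) ++ lt.toList ++ p.1 ++ rt.toList)

def render_line_alt (line : String) (disallow_tags : Option (List String)) : String :=
  String.ofList (loopB (line.toList.length + 1) line.toList (disallow_tags.getD []) []).1

-- ===== PRECONDITION & SPEC =====
def Spec_render_line (line : String) (disallow_tags : Option (List String)) (out : String) : Prop := out = render_line_alt line disallow_tags
instance (line : String) (disallow_tags : Option (List String)) (out : String) : Decidable (Spec_render_line line disallow_tags out) := by unfold Spec_render_line; infer_instance

-- ===== CLAIM (what is proved, stated in full; the proofs are below) =====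
def Claim_equal_render_line : Prop := ∀ (line : String) (disallow_tags : Option (List String)), Dom_render_line line disallow_tags → Spec_render_line line disallow_tags (render_line line disallow_tags)

-- ===== LEMMAS AND PROOFS =====

-- A's collect-loop produces exactly B's comprehension
theorem cands_eq (line : List Char) (d : List String) : candsA line d = candsB line d := by
  unfold candsA candsB
  congr 1
  have h : ∀ (xs : List (List Char × String × String))
      (acc : List (List Char × String × String × Int)),
      xs.foldl (fun acc s =>
        if s.2.1 ∈ d then acc
        else
          let ind := PySem.Chars.find line s.1
          if ind < 0 then acc else acc ++ [(s.1, s.2.1, s.2.2, ind)]) acc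
      = acc ++ xs.filterMap (fun s =>
          if s.2.1 ∈ d then none
          else
            let ind := PySem.Chars.find line s.1
            if ind < 0 then none else some (s.1, s.2.1, s.2.2, ind)) := by
    intro xs
    induction xs with
    | nil => simp
    | cons s rest ih =>
      intro acc
      simp only [List.foldl_cons, List.filterMap_cons]
      by_cases h1 : s.2.1 ∈ d
      · simp [h1, ih]
      · by_cases h2 : PySem.Chars.find line s.1 < 0
        · simp [h1, h2, ih]
        · simp [h1, h2, ih]
  simpa using h spansTable []

-- A's interleaved scan = B's pure search followed by the rendering step
theorem scanA_eq (r : List Char → List String → (List Char × List String))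
    (line : List Char) (d : List String)
    (cs : List (List Char × String × String × Int)) :
    scanA r line d cs =
      match scanFindB line cs with
      | none => (line, d)
      | some (span, lt, rt, ind, pair) =>
        let p := r (PySem.List.slice line (some (ind + (span.length : Int))) (some pair))
                   (d ++ [lt])
        let q := r (PySem.List.slice line (some (pair + (span.length : Int)))) p.2
        (PySem.List.slice line none (some ind) ++ lt.toList ++ p.1 ++ rt.toList ++ q.1, q.2) := by
  induction cs with
  | nil => rfl
  | cons c rest ih =>
    simp only [scanA, scanFindB]
    by_cases h1 : PySem.Chars.findFrom line c.1 (c.2.2.2 + (c.1.length : Int)) < 0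
    · simp [h1, ih]
    · by_cases h2 : PySem.List.slice line
          (some (c.2.2.2 + (c.1.length : Int)))
          (some (PySem.Chars.findFrom line c.1 (c.2.2.2 + (c.1.length : Int)))) = []
      · simp [h1, h2, ih]
      · simp [h1, h2, List.append_assoc]

-- main invariant: B's loop = accumulator + A's recursion, for every fuel
theorem loopB_eq_renderA : ∀ (f : Nat) (line : List Char) (d : List String) (acc : List Char),
    loopB f line d acc = (acc ++ (renderA f line d).1, (renderA f line d).2) := by
  intro f
  induction f with
  | zero => intro line d acc; rfl
  | succ f ih =>
    intro line d acc
    simp only [loopB, renderA, findSpanB, ← cands_eq, scanA_eq]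
    cases h : scanFindB line (candsA line d) with
    | none => simp
    | some c =>
      obtain ⟨span, lt, rt, ind, pair⟩ := c
      simp only [ih, List.nil_append, List.append_assoc]

-- ===== VERDICT (by name: the statement is the Claim_ definition above) =====
theorem render_line_spec : Claim_equal_render_line := by
  intro line disallow_tags _
  unfold Spec_render_line render_line render_line_alt
  rw [loopB_eq_renderA]
  simp
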